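-- pv_equiv track=rewrite | github.com/Aklinahs/Quizlerapp | hackerrank.py | health_calculator
-- ===== SOURCE A (Python) =====
-- def health_calculator(genes, health, dna):
--     gene_health = 0
--
--     for i in range(len(genes)):
--         count = 0
--         beg = 0
--         while dna.find(genes[i], beg) != -1:
--             count += 1
--             beg = dna.find(genes[i], beg)
--             beg += 1
--         gene_health += count * health[i]
--
--     return gene_health
-- ===== SOURCE B (Python) =====
-- def health_calculator(genes, health, dna):
--     # Aggregate health per distinct gene, then build one substring-frequency hash table
--     # per distinct gene length in a single scan of dna each; every gene count is a lookup.
--     agg = {}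
--     for g, h in zip(genes, health):
--         agg[g] = agg.get(g, 0) + h
--     n = len(dna)
--     counters = {}
--     for g in agg:
--         L = len(g)
--         if L not in counters:
--             c = {}
--             for p in range(n - L + 1):
--                 sub = dna[p:p + L]
--                 c[sub] = c.get(sub, 0) + 1
--             counters[L] = c
--     total = 0
--     for g, h in agg.items():
--         total += counters[len(g)].get(g, 0) * h
--     return total
-- ===== Notes on version B (the rewrite author's own statement) =====
-- stated objective: faster
-- what changed: B aggregates health per distinct gene in a dict, builds one substring-frequency hash table per distinct gene length with a single scan of dna each, and turns every gene count into a hash lookup, instead of A's repeated str.find scan of dna for every gene occurrence of every (possibly duplicate) gene.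
-- outside the precondition, e.g. on health_calculator(['a', 'b'], [1], 'ab'): A raises IndexError, B returns 1
import Mathlib
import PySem

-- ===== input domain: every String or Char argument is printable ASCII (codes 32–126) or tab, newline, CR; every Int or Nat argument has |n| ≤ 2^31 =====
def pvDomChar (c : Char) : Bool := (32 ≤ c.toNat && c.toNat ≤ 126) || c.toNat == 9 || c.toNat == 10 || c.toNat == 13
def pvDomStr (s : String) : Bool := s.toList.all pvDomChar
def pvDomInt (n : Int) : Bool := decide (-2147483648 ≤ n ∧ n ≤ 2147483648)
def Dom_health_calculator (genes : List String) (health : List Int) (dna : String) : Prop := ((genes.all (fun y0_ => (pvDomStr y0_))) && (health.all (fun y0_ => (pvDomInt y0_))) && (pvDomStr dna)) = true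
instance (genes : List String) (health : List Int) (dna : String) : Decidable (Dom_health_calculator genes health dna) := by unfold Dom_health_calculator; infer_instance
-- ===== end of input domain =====

-- B replaces A's per-gene repeated str.find scans by a dict aggregating health per distinct
-- gene plus one substring-frequency table per distinct gene length (counts become lookups).


-- ===== PORT A =====
-- the inner 'while dna.find(g, beg) != -1' loop; fuel = |dna| + 1 - beg is always enough
-- because each found index is ≥ beg and beg advances past it
def pvACount (s g : List Char) : Nat → Nat → Int
  | 0, _ => 0
  | fuel + 1, beg =>
    if PySem.Chars.findFrom s g (beg : Int) ≠ -1 then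
      1 + pvACount s g fuel ((PySem.Chars.findFrom s g (beg : Int)).toNat + 1)
    else 0

-- health.getD i 0 stands for health[i]; Pre_ guarantees i < health.length, where it is exact
def health_calculator (genes : List String) (health : List Int) (dna : String) : Int :=
  (List.range genes.length).foldl
    (fun gene_health i =>
      gene_health + pvACount dna.toList (genes.getD i "").toList (dna.toList.length + 1) 0 * health.getD i 0)
    0

-- ===== PORT B =====
-- agg[g] = agg.get(g, 0) + h over zip(genes, health)
def pvAgg (genes : List String) (health : List Int) : PySem.Dict String Int :=
  (genes.zip health).foldl (fun d gh => d.insert gh.1 (d.getD gh.1 0 + gh.2)) PySem.Dict.empty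

-- the inner 'for p in range(n - L + 1): c[dna[p:p+L]] = c.get(.., 0) + 1' loop;
-- List.range m.toNat is exactly Python's range(m) for any int m (empty when m ≤ 0)
def pvSubCounter (dna : String) (L : Int) : PySem.Dict String Int :=
  (List.range (((dna.toList.length : Int) - L + 1).toNat)).foldl
    (fun c (p : Nat) =>
      let sub := PySem.Str.slice dna (some (p : Int)) (some ((p : Int) + L))
      c.insert sub (c.getD sub 0 + 1)) PySem.Dict.empty

-- 'for g in agg: if len(g) not in counters: counters[len(g)] = <frequency table>'
def pvCounters (keys : List String) (dna : String) : PySem.Dict Int (PySem.Dict String Int) :=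
  keys.foldl
    (fun cs g => if cs.contains (PySem.Str.len g) then cs
      else cs.insert (PySem.Str.len g) (pvSubCounter dna (PySem.Str.len g)))
    PySem.Dict.empty

-- counters[len(g)] never misses (len(g) was inserted above); the ∅ default is never used
def health_calculator_alt (genes : List String) (health : List Int) (dna : String) : Int :=
  (pvAgg genes health).items.foldl
    (fun total gh =>
      total + ((pvCounters (pvAgg genes health).keys dna).getD (PySem.Str.len gh.1)
        PySem.Dict.empty).getD gh.1 0 * gh.2) 0

-- ===== PRECONDITION & SPEC =====
-- Pre_ excludes exactly the inputs where A raises IndexError on health[i] (fewer healths than genes)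
def Pre_health_calculator (genes : List String) (health : List Int) (dna : String) : Prop :=
  genes.length ≤ health.length
instance (genes : List String) (health : List Int) (dna : String) : Decidable (Pre_health_calculator genes health dna) := by unfold Pre_health_calculator; infer_instance
def pvWitness_health_calculator : List String × List Int × String := (["a", "b"], [1, 2], "aab")

def Spec_health_calculator (genes : List String) (health : List Int) (dna : String) (out : Int) : Prop := out = health_calculator_alt genes health dna
instance (genes : List String) (health : List Int) (dna : String) (out : Int) : Decidable (Spec_health_calculator genes health dna out) := by unfold Spec_health_calculator; infer_instance

-- ===== CLAIM (what is proved, stated in full; the proofs are below) =====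
def Claim_equal_health_calculator : Prop := ∀ (genes : List String) (health : List Int) (dna : String), Dom_health_calculator genes health dna → Pre_health_calculator genes health dna → Spec_health_calculator genes health dna (health_calculator genes health dna)

-- ===== LEMMAS AND PROOFS =====

theorem pv_findFrom_of_gt (s g : List Char) (k : Nat) (h : s.length < k) :
    PySem.Chars.findFrom s g (k : Int) = -1 := by
  unfold PySem.Chars.findFrom
  have h1 : ((s.length : Int)) < (k : Int) := by exact_mod_cast h
  split_ifs with h2 <;> simp_all <;> omega

theorem pv_occ_infix (s g : List Char) (beg p : Nat) (hbp : beg ≤ p)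
    (hocc : g <+: s.drop p) : g <:+: s.drop beg := by
  rw [← PySem.Chars.isIn_iff_infix, ← PySem.Chars.exists_prefix_drop_iff_isIn]
  exact ⟨p - beg, by rw [List.drop_drop, show beg + (p - beg) = p from by omega]; exact hocc⟩

-- A's find loop counts exactly the start positions p ∈ [beg, |s|] where g occurs
theorem pv_aCount_eq_countP (s g : List Char) (fuel beg : Nat)
    (hf : s.length + 1 - beg ≤ fuel) :
    pvACount s g fuel beg =
      ((List.range' beg (s.length + 1 - beg)).countP
        (fun p => PySem.Chars.startswith (s.drop p) g) : Int) := by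
  induction fuel generalizing beg with
  | zero =>
    have h0 : s.length + 1 - beg = 0 := by omega
    simp [pvACount, h0]
  | succ fuel ih =>
    by_cases hb : beg ≤ s.length
    · by_cases hF : PySem.Chars.findFrom s g (beg : Int) = -1
      · have hni : ¬ g <:+: s.drop beg :=
          (PySem.Chars.findFrom_natCast_eq_neg_one_iff s g beg hb).mp hF
        have hz : (List.range' beg (s.length + 1 - beg)).countP
            (fun p => PySem.Chars.startswith (s.drop p) g) = 0 := by
          rw [List.countP_eq_zero]
          intro p hp
          simp only [← Bool.not_eq_true, PySem.Chars.startswith_iff]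
          rw [List.mem_range'_1] at hp
          intro hpre
          exact hni (pv_occ_infix s g beg p hp.1 hpre)
        simp [pvACount, hF, hz]
      · obtain ⟨hle, hpre, hmin⟩ := PySem.Chars.findFrom_natCast_spec s g beg hb hF
        set F := PySem.Chars.findFrom s g (beg : Int) with hFdef
        have hF0 : 0 ≤ F := le_trans (by exact_mod_cast Nat.zero_le beg) hle
        have hbegF : beg ≤ F.toNat := by omega
        have hFlen : F.toNat ≤ s.length := by
          by_contra hgt
          push_neg at hgt
          have hdn : s.drop F.toNat = [] := List.drop_eq_nil_of_le (by omega)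
          rw [hdn] at hpre
          have hg : g = [] := List.prefix_nil.mp hpre
          exact (hmin beg le_rfl (by omega)) (hg ▸ List.nil_prefix)
        have hsplit : List.range' beg (F.toNat - beg) ++ List.range' F.toNat (s.length + 1 - F.toNat)
            = List.range' beg (s.length + 1 - beg) := by
          have hr := @List.range'_append beg (F.toNat - beg) (s.length + 1 - F.toNat) 1
          simp only [one_mul] at hr
          rw [show beg + (F.toNat - beg) = F.toNat by omega] at hr
          rw [hr]
          congr 1
          omega
        have hz1 : (List.range' beg (F.toNat - beg)).countP
            (fun p => PySem.Chars.startswith (s.drop p) g) = 0 := by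
          rw [List.countP_eq_zero]
          intro p hp
          rw [List.mem_range'_1] at hp
          simp only [← Bool.not_eq_true, PySem.Chars.startswith_iff]
          exact fun hc => (hmin p hp.1 (by omega)) hc
        have hcons : List.range' F.toNat (s.length + 1 - F.toNat)
            = F.toNat :: List.range' (F.toNat + 1) (s.length - F.toNat) := by
          rw [show s.length + 1 - F.toNat = (s.length - F.toNat) + 1 by omega,
            List.range'_succ]
        have hoccF : PySem.Chars.startswith (s.drop F.toNat) g = true :=
          (PySem.Chars.startswith_iff _ _).mpr hpre
        have ihF := ih (F.toNat + 1) (by omega)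
        rw [show s.length + 1 - (F.toNat + 1) = s.length - F.toNat from by omega] at ihF
        simp only [pvACount, hF, if_pos (by exact hF), ← hFdef, ihF]
        rw [← hsplit, List.countP_append, hz1, hcons, List.countP_cons, hoccF]
        simp only [if_pos trivial]
        omega
    · have h0 : s.length + 1 - beg = 0 := by omega
      simp [pvACount, pv_findFrom_of_gt s g beg (by omega), h0]

theorem pv_aCount_full (s g : List Char) :
    pvACount s g (s.length + 1) 0 =
      ((List.range (s.length + 1)).countP
        (fun p => PySem.Chars.startswith (s.drop p) g) : Int) := by
  rw [pv_aCount_eq_countP s g (s.length + 1) 0 (by omega), List.range_eq_range']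
  simp

-- the frequency table of length-|g| substrings looks g up to its occurrence count
theorem pv_subCounter_getD (dna g : String) :
    (pvSubCounter dna ((g.toList.length : Int))).getD g 0 =
      ((List.range (dna.toList.length + 1)).countP
        (fun p => PySem.Chars.startswith (dna.toList.drop p) g.toList) : Int) := by
  set s := dna.toList with hs
  set L := g.toList.length with hL
  set M := (((s.length : Int)) - (L : Int) + 1).toNat with hM
  have hML : M ≤ s.length + 1 := by omega
  have h1 : pvSubCounter dna (L : Int) =
      PySem.Dict.counter ((List.range M).map
        (fun p : Nat => PySem.Str.slice dna (some (p : Int)) (some ((p : Int) + L)))) := by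
    have hfm := @List.foldl_map Nat String (PySem.Dict String Int)
      (fun p : Nat => PySem.Str.slice dna (some (p : Int)) (some ((p : Int) + (L : Int))))
      (fun c sub => c.insert sub (c.getD sub 0 + 1)) (List.range M) PySem.Dict.empty
    rw [← PySem.Dict.foldl_insert_getD_add_one_eq_counter, hfm]
    rfl
  rw [h1, PySem.Dict.getD_counter]
  congr 1
  rw [List.count_eq_countP, List.countP_map]
  have hpred : ∀ p ∈ List.range M,
      (((fun x => x == g) ∘ fun p : Nat => PySem.Str.slice dna (some (p : Int)) (some ((p : Int) + L))) p = true)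
        ↔ ((fun p => PySem.Chars.startswith (s.drop p) g.toList) p = true) := by
    intro p hp
    rw [List.mem_range] at hp
    have hcast : ((p : Int) + L) = ((p + L : Nat) : Int) := by push_cast; ring
    have hsl : (PySem.Str.slice dna (some (p : Int)) (some ((p : Int) + L))).toList
        = (s.drop p).take L := by
      rw [PySem.Str.toList_slice, PySem.Chars.slice_eq_listSlice, hcast,
        PySem.List.slice_natCast]
      congr 1
      omega
    simp only [Function.comp, beq_iff_eq, PySem.Chars.startswith_iff]
    constructor
    · intro he
      rw [List.prefix_iff_eq_take, ← hL, ← hsl, he]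
    · intro hpre
      have hgt := List.prefix_iff_eq_take.mp hpre
      rw [← hL] at hgt
      apply String.ext
      rw [hsl, ← hgt]
  rw [List.countP_congr hpred]
  have hz : (List.range' M (s.length + 1 - M)).countP
      (fun p => PySem.Chars.startswith (s.drop p) g.toList) = 0 := by
    rw [List.countP_eq_zero]
    intro p hp
    rw [List.mem_range'_1] at hp
    simp only [← Bool.not_eq_true, PySem.Chars.startswith_iff]
    intro hpre
    have hlen := hpre.length_le
    rw [List.length_drop] at hlen
    omega
  have hsplit : List.range' 0 M ++ List.range' M (s.length + 1 - M)
      = List.range' 0 (s.length + 1) := by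
    have hr := @List.range'_append 0 M (s.length + 1 - M) 1
    simp only [one_mul, Nat.zero_add] at hr
    rw [hr]
    congr 1
    omega
  rw [List.range_eq_range', List.range_eq_range', ← hsplit, List.countP_append, hz]
  omega

theorem pv_counters_mono (dna : String) (K : List String)
    (cs : PySem.Dict Int (PySem.Dict String Int)) (k : Int)
    (h : cs.contains k = true) :
    (K.foldl (fun cs g => if cs.contains (PySem.Str.len g) then cs
      else cs.insert (PySem.Str.len g) (pvSubCounter dna (PySem.Str.len g))) cs).contains k = true := by
  induction K generalizing cs with
  | nil => exact h
  | cons g t ih =>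
    simp only [List.foldl_cons]
    apply ih
    split_ifs with hc
    · exact h
    · rw [PySem.Dict.contains_insert]
      simp [h]

theorem pv_counters_mem (dna : String) (K : List String)
    (cs : PySem.Dict Int (PySem.Dict String Int)) (g : String) (hg : g ∈ K) :
    (K.foldl (fun cs g => if cs.contains (PySem.Str.len g) then cs
      else cs.insert (PySem.Str.len g) (pvSubCounter dna (PySem.Str.len g))) cs).contains
      (PySem.Str.len g) = true := by
  induction K generalizing cs with
  | nil => simp at hg
  | cons a t ih =>
    simp only [List.foldl_cons]
    rcases List.mem_cons.mp hg with h | h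
    · subst h
      apply pv_counters_mono
      split_ifs with hc
      · exact hc
      · exact PySem.Dict.contains_insert_self _ _ _
    · exact ih _ h

theorem pv_counters_inv (dna : String) (K : List String)
    (cs : PySem.Dict Int (PySem.Dict String Int))
    (hcs : ∀ k, cs.contains k = true → cs.getD k PySem.Dict.empty = pvSubCounter dna k)
    (k : Int)
    (hk : (K.foldl (fun cs g => if cs.contains (PySem.Str.len g) then cs
      else cs.insert (PySem.Str.len g) (pvSubCounter dna (PySem.Str.len g))) cs).contains k = true) :
    (K.foldl (fun cs g => if cs.contains (PySem.Str.len g) then cs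
      else cs.insert (PySem.Str.len g) (pvSubCounter dna (PySem.Str.len g))) cs).getD k PySem.Dict.empty
      = pvSubCounter dna k := by
  induction K generalizing cs with
  | nil => exact hcs k hk
  | cons g t ih =>
    simp only [List.foldl_cons] at hk ⊢
    apply ih _ _ hk
    intro k' hk'
    split_ifs at hk' ⊢ with hc
    · exact hcs k' hk'
    · rw [PySem.Dict.getD_insert]
      split_ifs with he
      · subst he; rfl
      · rw [PySem.Dict.contains_insert] at hk'
        rcases (Bool.or_eq_true _ _).mp hk' with h | h
        · exact absurd (beq_iff_eq.mp h) he
        · exact hcs k' h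

theorem pv_counters_getD (dna : String) (K : List String) (g : String) (hg : g ∈ K) :
    (pvCounters K dna).getD (PySem.Str.len g) PySem.Dict.empty
      = pvSubCounter dna (PySem.Str.len g) := by
  unfold pvCounters
  exact pv_counters_inv dna K PySem.Dict.empty
    (by intro k hk; rw [PySem.Dict.contains_empty] at hk; cases hk)
    (PySem.Str.len g) (pv_counters_mem dna K PySem.Dict.empty g hg)

theorem pv_getD_agg (L : List (String × Int)) (d : PySem.Dict String Int) (k : String) :
    (L.foldl (fun d gh => d.insert gh.1 (d.getD gh.1 0 + gh.2)) d).getD k 0 =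
      d.getD k 0 + ((L.filter (fun p => p.1 == k)).map (·.2)).sum := by
  induction L generalizing d with
  | nil => simp
  | cons p t ih =>
    simp only [List.foldl_cons, ih, List.filter_cons]
    rw [PySem.Dict.getD_insert]
    by_cases hk : p.1 = k
    · subst hk; simp
      ring
    · have hbk : (p.1 == k) = false := by simp [hk]
      simp [hbk, Ne.symm hk]

theorem pv_sum_ite_single (K : List String) (k : String) (hk : k ∈ K) (hnd : K.Nodup)
    (v : String → Int) :
    (K.map (fun x => if k = x then v x else 0)).sum = v k := by
  induction K with
  | nil => simp at hk
  | cons a t ih =>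
    simp only [List.map_cons, List.sum_cons]
    have hnd' := List.nodup_cons.mp hnd
    by_cases hka : k = a
    · subst hka
      have hz : (t.map (fun x => if k = x then v x else 0)).sum = 0 := by
        apply List.sum_eq_zero; intro y hy
        simp only [List.mem_map] at hy
        obtain ⟨x, hx, rfl⟩ := hy
        have hne : k ≠ x := fun he => hnd'.1 (he ▸ hx)
        simp [hne]
      simp [hz]
    · have hkt : k ∈ t := by
        rcases List.mem_cons.mp hk with h | h
        · exact absurd h hka
        · exact h
      rw [ih hkt hnd'.2]; simp [hka]

theorem pv_regroup (f : String → Int) (L : List (String × Int)) (K : List String)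
    (hnd : K.Nodup) (hcov : ∀ p ∈ L, p.1 ∈ K) :
    (K.map (fun k => f k * ((L.filter (fun p => p.1 == k)).map (·.2)).sum)).sum =
      (L.map (fun p => f p.1 * p.2)).sum := by
  induction L with
  | nil => simp
  | cons p t ih =>
    simp only [List.filter_cons, List.map_cons, List.sum_cons]
    have step : (K.map (fun k => f k * ((if p.1 == k then p :: (t.filter (fun q => q.1 == k)) else t.filter (fun q => q.1 == k)).map (·.2)).sum)).sum
        = (K.map (fun k => (if p.1 = k then f k * p.2 else 0) + f k * ((t.filter (fun q => q.1 == k)).map (·.2)).sum)).sum := by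
      congr 1
      apply List.map_congr_left
      intro k hkK
      by_cases h : p.1 = k <;> simp [h] <;> ring
    rw [step, PySem.List.sum_map_add_int,
      ih (fun q hq => hcov q (List.mem_cons_of_mem _ hq)),
      pv_sum_ite_single K p.1 (hcov p (List.mem_cons_self)) hnd (fun x => f x * p.2)]

-- ===== VERDICT (by name: the statement is the Claim_ definition above) =====
theorem health_calculator_spec : Claim_equal_health_calculator := by
  intro genes health dna _ hpre
  unfold Spec_health_calculator health_calculator health_calculator_alt pvAgg
  set s := dna.toList with hs
  set L := genes.zip health with hL
  set f : String → Int := fun k =>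
    ((List.range (s.length + 1)).countP
      (fun p => PySem.Chars.startswith (s.drop p) k.toList) : Int) with hf
  set agg := L.foldl (fun d gh => d.insert gh.1 (d.getD gh.1 0 + gh.2)) PySem.Dict.empty with hagg
  have hnodup : agg.keys.Nodup := by
    rw [hagg]
    exact PySem.Dict.nodup_keys_foldl_insert_key L (·.1) (fun d gh => d.getD gh.1 0 + gh.2)
      PySem.Dict.empty PySem.Dict.nodup_keys_empty
  have hkeys : agg.keys = PySem.Set.ofList (L.map (·.1)) := by
    rw [hagg, PySem.Dict.keys_foldl_insert_key L (·.1) (fun d gh => d.getD gh.1 0 + gh.2),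
      PySem.Dict.keys_empty, PySem.Set.update_nil_left]
  have hitems : agg.items = agg.keys.map (fun k => (k, agg.getD k 0)) :=
    PySem.Dict.items_eq_map_keys agg hnodup 0
  have hgetD : ∀ k, agg.getD k 0 = ((L.filter (fun p => p.1 == k)).map (·.2)).sum := by
    intro k
    rw [hagg, pv_getD_agg, PySem.Dict.getD_empty]
    omega
  -- the counters lookup computes f on every aggregated gene
  have hlookup : ∀ k ∈ agg.keys,
      ((pvCounters agg.keys dna).getD (PySem.Str.len k) PySem.Dict.empty).getD k 0 = f k := by
    intro k hk
    rw [pv_counters_getD dna agg.keys k hk,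
      show PySem.Str.len k = ((k.toList.length : Nat) : Int) from rfl,
      pv_subCounter_getD dna k, hf]
  rw [PySem.List.foldl_add agg.items
      (fun gh => ((pvCounters agg.keys dna).getD (PySem.Str.len gh.1) PySem.Dict.empty).getD gh.1 0 * gh.2) 0,
    PySem.List.foldl_add (List.range genes.length)
      (fun i => pvACount s (genes.getD i "").toList (s.length + 1) 0 * health.getD i 0) 0,
    hitems, List.map_map]
  have hB : (agg.keys.map ((fun gh => ((pvCounters agg.keys dna).getD (PySem.Str.len gh.1) PySem.Dict.empty).getD gh.1 0 * gh.2) ∘ fun k => (k, agg.getD k 0))).sum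
      = (L.map (fun p => f p.1 * p.2)).sum := by
    have hmc : (agg.keys.map ((fun gh => ((pvCounters agg.keys dna).getD (PySem.Str.len gh.1) PySem.Dict.empty).getD gh.1 0 * gh.2) ∘ fun k => (k, agg.getD k 0)))
        = agg.keys.map (fun k => f k * ((L.filter (fun p => p.1 == k)).map (·.2)).sum) := by
      apply List.map_congr_left
      intro k hk
      simp only [Function.comp]
      rw [hlookup k hk, hgetD k]
    rw [hmc, hkeys]
    exact pv_regroup f L (PySem.Set.ofList (L.map (·.1))) (hkeys ▸ hnodup)
      (fun p hp => (PySem.Set.mem_ofList _ _).mpr (List.mem_map_of_mem hp))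
  rw [hB]
  have hA : (List.range genes.length).map
        (fun i => pvACount s (genes.getD i "").toList (s.length + 1) 0 * health.getD i 0)
      = L.map (fun p => f p.1 * p.2) := by
    apply List.ext_getElem
    · simp only [List.length_map, List.length_range, hL, List.length_zip]
      exact (Nat.min_eq_left hpre).symm
    · intro i h1 h2
      have hig : i < genes.length := by simpa using h1
      have hih : i < health.length := lt_of_lt_of_le hig hpre
      simp only [List.getElem_map, List.getElem_range, hL, List.getElem_zip]
      rw [List.getD_eq_getElem genes "" hig, List.getD_eq_getElem health 0 hih]
      simp only [hf]
      rw [pv_aCount_full]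
  rw [hA]
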